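-- pv_equiv track=rewrite | github.com/JanzenLiu/MercariPrice | code/prep/fill_brand.py | _get_multiword_dict
-- ===== SOURCE A (Python) =====
-- def _get_multiword_dict(s_lst):
--     """
--     Generate auxiliary dictionary to for brand filling with given string list
--
--     :param s_lst: [string]
--     :return: dict
--     """
--     d = {}
--     for s in s_lst:
--         w_list = s.split(" ")  # split string into word sequence/list
--         if len(w_list) < 2:
--             continue  # skip word with single word
--         w = w_list[0].lower()
--         if w in d.keys():
--             d[w].append(s)
--         else:
--             d[w] = [s]
--     return d
-- ===== SOURCE B (Python) =====
-- def _first_word_key(s):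
--     return s.split(" ")[0].lower()
--
--
-- def _get_multiword_dict(s_lst):
--     """
--     Generate auxiliary dictionary for brand filling with given string list.
--     Two-pass grouping: first select the multi-word strings, then collect the
--     distinct first-word keys in order of first appearance, and finally build
--     each group by scanning the selected strings once per key.
--     """
--     multi = [s for s in s_lst if len(s.split(" ")) >= 2]
--     keys = []
--     for s in multi:
--         k = _first_word_key(s)
--         if k not in keys:
--             keys.append(k)
--     return {k: [s for s in multi if _first_word_key(s) == k] for k in keys}
-- ===== Notes on version B (the rewrite author's own statement) =====
-- stated objective: alternative
-- what changed: Replaces the single-pass dict-accumulator loop with a two-pass grouping: filter the multi-word strings, collect the distinct first-word keys in first-appearance order, then build each group by a per-key scan of the filtered list.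
import Mathlib
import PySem

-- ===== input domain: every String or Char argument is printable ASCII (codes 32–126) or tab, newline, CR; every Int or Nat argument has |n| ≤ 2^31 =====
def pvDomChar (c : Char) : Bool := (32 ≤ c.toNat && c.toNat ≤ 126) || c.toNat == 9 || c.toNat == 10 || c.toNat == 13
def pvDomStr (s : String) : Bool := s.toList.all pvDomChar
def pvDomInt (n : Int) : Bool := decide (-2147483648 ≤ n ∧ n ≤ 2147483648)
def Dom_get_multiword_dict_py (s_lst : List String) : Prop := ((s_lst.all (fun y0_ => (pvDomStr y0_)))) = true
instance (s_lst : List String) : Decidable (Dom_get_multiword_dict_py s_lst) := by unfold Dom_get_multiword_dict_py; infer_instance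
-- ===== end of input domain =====

-- B replaces A's single-pass dict accumulator by a two-pass grouping (filter, then
-- ordered distinct keys, then one scan per key); same return value, alternative structure.

-- shared helpers: s.split(" ") and s.split(" ")[0].lower() (split with a non-empty
-- separator never returns an empty list, so index 0 is safe and headD is exact)
def pvWords (s : String) : List (List Char) := PySem.Chars.splitOn s.toList [' ']
def pvKey (s : String) : String := String.ofList (PySem.Chars.lower ((pvWords s).headD []))

-- ===== PORT A =====
def get_multiword_dict_py (s_lst : List String) : List (String × List String) :=
  (s_lst.foldl
    (fun (d : PySem.Dict String (List String)) s =>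
      let w_list := pvWords s
      if w_list.length < 2 then d
      else
        let w := String.ofList (PySem.Chars.lower (w_list.headD []))
        if d.contains w then d.modify w [] (fun l => l ++ [s])
        else d.insert w [s])
    PySem.Dict.empty).items

-- ===== PORT B =====
-- the final dict comprehension ranges over distinct keys, so its items list is
-- exactly the map below (one entry per key, in key order)
def get_multiword_dict_py_alt (s_lst : List String) : List (String × List String) :=
  let multi := s_lst.filter (fun s => decide (2 ≤ (pvWords s).length))
  let keys := multi.foldl (fun ks s => if pvKey s ∈ ks then ks else ks ++ [pvKey s]) ([] : List String)
  keys.map (fun k => (k, multi.filter (fun s => pvKey s == k)))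

-- ===== PRECONDITION & SPEC =====
def Spec_get_multiword_dict_py (s_lst : List String) (out : List (String × List String)) : Prop := out = get_multiword_dict_py_alt s_lst
instance (s_lst : List String) (out : List (String × List String)) : Decidable (Spec_get_multiword_dict_py s_lst out) := by unfold Spec_get_multiword_dict_py; infer_instance

-- ===== CLAIM (what is proved, stated in full; the proofs are below) =====
def Claim_equal_get_multiword_dict_py : Prop := ∀ (s_lst : List String), Dom_get_multiword_dict_py s_lst → Spec_get_multiword_dict_py s_lst (get_multiword_dict_py s_lst)

-- ===== LEMMAS AND PROOFS =====

-- A's loop body, named for the proofs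
def pvStepA (d : PySem.Dict String (List String)) (s : String) : PySem.Dict String (List String) :=
  let w_list := pvWords s
  if w_list.length < 2 then d
  else
    let w := String.ofList (PySem.Chars.lower (w_list.headD []))
    if d.contains w then d.modify w [] (fun l => l ++ [s])
    else d.insert w [s]

-- on a multi-word string A's body is an unconditional modify (insert = modify on an absent key)
lemma pvStepA_eq (d : PySem.Dict String (List String)) (s : String) :
    pvStepA d s = if 2 ≤ (pvWords s).length then d.modify (pvKey s) [] (fun l => l ++ [s]) else d := by
  unfold pvStepA pvKey
  by_cases h : (pvWords s).length < 2
  · rw [if_pos h, if_neg (by omega)]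
  · rw [if_neg h, if_pos (by omega : 2 ≤ (pvWords s).length)]
    by_cases hc : d.contains (String.ofList (PySem.Chars.lower ((pvWords s).headD []))) = true
    · rw [if_pos hc]
    · rw [if_neg hc]
      have hc' : d.contains (String.ofList (PySem.Chars.lower ((pvWords s).headD []))) = false := by
        simpa using hc
      simp only [PySem.Dict.modify, PySem.Dict.getD_of_not_contains d [] hc',
        List.nil_append]

-- A's fold over the whole list = the modify-fold over the filtered (multi-word) list
lemma pvFoldA_eq (l : List String) (d : PySem.Dict String (List String)) :
    l.foldl pvStepA d
      = (l.filter (fun s => decide (2 ≤ (pvWords s).length))).foldl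
          (fun d s => d.modify (pvKey s) [] (fun l => l ++ [s])) d := by
  induction l generalizing d with
  | nil => rfl
  | cons s t ih =>
    by_cases h : 2 ≤ (pvWords s).length
    · simp [h, ih, pvStepA_eq, List.foldl_cons]
    · simp [h, ih, pvStepA_eq]

-- ===== VERDICT (by name: the statement is the Claim_ definition above) =====
theorem get_multiword_dict_py_spec : Claim_equal_get_multiword_dict_py := by
  intro s_lst _
  show get_multiword_dict_py s_lst = get_multiword_dict_py_alt s_lst
  unfold get_multiword_dict_py
  rw [show (fun (d : PySem.Dict String (List String)) s =>
      let w_list := pvWords s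
      if w_list.length < 2 then d
      else
        let w := String.ofList (PySem.Chars.lower (w_list.headD []))
        if d.contains w then d.modify w [] (fun l => l ++ [s])
        else d.insert w [s]) = pvStepA from rfl, pvFoldA_eq]
  set multi := s_lst.filter (fun s => decide (2 ≤ (pvWords s).length)) with hmulti
  -- B's key loop is the ordered-dedup of the keys of multi
  have hkeys : multi.foldl (fun ks s => if pvKey s ∈ ks then ks else ks ++ [pvKey s]) ([] : List String)
      = PySem.Set.ofList (multi.map pvKey) := by
    rw [← PySem.Set.update_nil_left, PySem.Set.update_map_eq_foldl_add]
    simp [PySem.Set.add_eq_ite]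
  -- A's dict: keys, nodup, lookups
  set G := multi.foldl (fun d s => d.modify (pvKey s) [] (fun l => l ++ [s]))
      (PySem.Dict.empty : PySem.Dict String (List String)) with hG
  have hGkeys : G.keys = PySem.Set.ofList (multi.map pvKey) := by
    rw [hG, PySem.Dict.keys_foldl_modify_key]
    simp [PySem.Set.update_nil_left]
  have hGnodup : G.keys.Nodup := by
    rw [hGkeys]; exact PySem.Set.nodup_ofList _
  have hGget : ∀ k, G.getD k [] = multi.filter (fun s => pvKey s == k) := by
    intro k
    have hp : multi.foldl (fun d s => d.modify (pvKey s) [] (fun l => l ++ [s]))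
        (PySem.Dict.empty : PySem.Dict String (List String))
        = (multi.map (fun s => (pvKey s, s))).foldl
            (fun d p => d.modify p.1 [] (fun l => l ++ [p.2])) PySem.Dict.empty := by
      rw [List.foldl_map]
    rw [hG, hp, PySem.Dict.getD_foldl_modify_append]
    simp [List.filter_map, List.map_map, Function.comp_def]
  have halt : get_multiword_dict_py_alt s_lst
      = (multi.foldl (fun ks s => if pvKey s ∈ ks then ks else ks ++ [pvKey s]) ([] : List String)).map
          (fun k => (k, multi.filter (fun s => pvKey s == k))) := rfl
  rw [PySem.Dict.items_eq_map_keys G hGnodup [], hGkeys, halt, hkeys]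
  exact List.map_congr_left (fun k _ => by rw [hGget k])
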